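-- pv_equiv track=rewrite | github.com/yizhou0522/Selected-Coursework | cs540/cs540-master/hw7/pokemon_stats.py | calculate_x_y
-- ===== SOURCE A (Python) =====
-- def calculate_x_y(stats):
--    x=0
--    y=0
--    for name, values in stats.items():
--        if(name=="Attack" or name=="Sp. Atk" or name=="Speed"):
--            x=x+int(values)
--        if(name=="Defense" or name=="Sp. Def" or name=="HP"):
--            y=y+int(values)
--    return (x,y)
-- ===== SOURCE B (Python) =====
-- def calculate_x_y(stats):
--     x = sum(int(stats.get(k, 0)) for k in ("Attack", "Sp. Atk", "Speed"))
--     y = sum(int(stats.get(k, 0)) for k in ("Defense", "Sp. Def", "HP"))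
--     return (x, y)
-- ===== Notes on version B (the rewrite author's own statement) =====
-- stated objective: idiomatic
-- what changed: Instead of scanning every dict entry and branching on its key, B directly probes the six fixed stat keys with dict.get(k, 0) and sums each group with a generator expression.
import Mathlib
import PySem

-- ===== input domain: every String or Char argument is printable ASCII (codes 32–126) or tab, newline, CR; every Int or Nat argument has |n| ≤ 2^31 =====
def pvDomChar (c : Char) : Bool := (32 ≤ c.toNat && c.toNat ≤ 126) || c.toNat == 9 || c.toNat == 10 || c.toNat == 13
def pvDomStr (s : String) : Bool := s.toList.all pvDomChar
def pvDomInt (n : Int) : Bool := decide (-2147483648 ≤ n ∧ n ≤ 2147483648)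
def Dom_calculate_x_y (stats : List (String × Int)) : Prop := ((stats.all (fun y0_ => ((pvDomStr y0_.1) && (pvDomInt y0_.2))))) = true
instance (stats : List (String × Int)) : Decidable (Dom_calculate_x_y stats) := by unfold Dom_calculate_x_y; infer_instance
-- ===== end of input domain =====

-- B sums the two groups by probing the six fixed stat keys with dict.get(k, 0),
-- instead of A's scan over all entries with key-branching (objective: idiomatic).

-- ===== PORT A =====
def calculate_x_y (stats : List (String × Int)) : Int × Int :=
  stats.foldl
    (fun (p : Int × Int) nv =>
      let x := if nv.1 = "Attack" ∨ nv.1 = "Sp. Atk" ∨ nv.1 = "Speed" then p.1 + nv.2 else p.1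
      let y := if nv.1 = "Defense" ∨ nv.1 = "Sp. Def" ∨ nv.1 = "HP" then p.2 + nv.2 else p.2
      (x, y))
    (0, 0)

-- ===== PORT B =====
-- sum(int(stats.get(k, 0)) for k in ks)
def pvSumKeys (stats : List (String × Int)) (ks : List String) : Int :=
  ks.foldl (fun a k => a + (PySem.Dict.mk stats).getD k 0) 0

def calculate_x_y_alt (stats : List (String × Int)) : Int × Int :=
  (pvSumKeys stats ["Attack", "Sp. Atk", "Speed"],
   pvSumKeys stats ["Defense", "Sp. Def", "HP"])

-- ===== PRECONDITION & SPEC =====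
-- Pre_ excludes association lists with duplicate keys, which cannot arise from a Python
-- dict (duplicate literal keys collapse before the call); on such lists A's entry scan
-- sums every duplicate while B's keyed lookups see only the first.
def Pre_calculate_x_y (stats : List (String × Int)) : Prop :=
  (stats.map Prod.fst).Nodup
instance (stats : List (String × Int)) : Decidable (Pre_calculate_x_y stats) := by
  unfold Pre_calculate_x_y; infer_instance

def pvWitness_calculate_x_y : (List (String × Int)) :=
  [("Attack", 3), ("HP", 5), ("Speed", -2), ("Name", 7)]

def Spec_calculate_x_y (stats : List (String × Int)) (out : Int × Int) : Prop := out = calculate_x_y_alt stats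
instance (stats : List (String × Int)) (out : Int × Int) : Decidable (Spec_calculate_x_y stats out) := by unfold Spec_calculate_x_y; infer_instance

-- ===== CLAIM (what is proved, stated in full; the proofs are below) =====
def Claim_equal_calculate_x_y : Prop := ∀ (stats : List (String × Int)), Dom_calculate_x_y stats → Pre_calculate_x_y stats → Spec_calculate_x_y stats (calculate_x_y stats)

-- ===== LEMMAS AND PROOFS =====

lemma foldl_add_eq_sum (f : String → Int) (ks : List String) (a : Int) :
    ks.foldl (fun a k => a + f k) a = a + (ks.map f).sum := by
  induction ks generalizing a with
  | nil => simp
  | cons q ks ih => simp [ih]; ring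

lemma pvSumKeys_eq_sum (stats : List (String × Int)) (ks : List String) :
    pvSumKeys stats ks = (ks.map (fun q => (PySem.Dict.mk stats).getD q 0)).sum := by
  unfold pvSumKeys
  rw [foldl_add_eq_sum]; simp

lemma pvGetD_mk_cons (k q : String) (v : Int) (rest : List (String × Int)) :
    (PySem.Dict.mk ((k, v) :: rest)).getD q 0 = if q = k then v else (PySem.Dict.mk rest).getD q 0 := by
  rw [PySem.Dict.getD_eq_get?_getD, PySem.Dict.get?_mk_cons]
  by_cases h : q = k
  · simp [h]
  · simp [h, Ne.symm h, PySem.Dict.getD_eq_get?_getD]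

lemma pvGetD_not_mem (k : String) (rest : List (String × Int)) (hk : k ∉ rest.map Prod.fst) :
    (PySem.Dict.mk rest).getD k 0 = 0 := by
  apply PySem.Dict.getD_of_not_contains
  rw [PySem.Dict.contains_eq_decide_mem_keys]
  simpa [PySem.Dict.keys] using hk

lemma ite_map_sum (k : String) (v : Int) (g : String → Int) (hgk : g k = 0)
    (ks : List String) (hks : ks.Nodup) :
    (ks.map (fun q => if q = k then v else g q)).sum = (if k ∈ ks then v else 0) + (ks.map g).sum := by
  induction ks with
  | nil => simp
  | cons q ks ih =>
      have hqks : q ∉ ks := (List.nodup_cons.mp hks).1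
      have hks' : ks.Nodup := (List.nodup_cons.mp hks).2
      simp only [List.map_cons, List.sum_cons]
      by_cases hqk : q = k
      · subst hqk
        have hmap : (ks.map (fun q' => if q' = q then v else g q')) = ks.map g := by
          apply List.map_congr_left
          intro q' hq'
          have : q' ≠ q := fun h => hqks (h ▸ hq')
          simp [this]
        simp [hmap, hgk]
      · rw [ih hks']
        by_cases hkks : k ∈ ks <;> simp only [List.mem_cons, hqk, Ne.symm hqk, hkks,
          if_true, if_false, false_or, or_false] <;> ring

lemma pvSumKeys_cons (ks : List String) (hks : ks.Nodup) (k : String) (v : Int)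
    (rest : List (String × Int)) (hk : k ∉ rest.map Prod.fst) :
    pvSumKeys ((k, v) :: rest) ks = (if k ∈ ks then v else 0) + pvSumKeys rest ks := by
  rw [pvSumKeys_eq_sum, pvSumKeys_eq_sum]
  simp only [pvGetD_mk_cons]
  exact ite_map_sum k v _ (pvGetD_not_mem k rest hk) ks hks

lemma calc_foldl (stats : List (String × Int)) (hnd : (stats.map Prod.fst).Nodup)
    (x y : Int) :
    stats.foldl
      (fun (p : Int × Int) nv =>
        let a := if nv.1 = "Attack" ∨ nv.1 = "Sp. Atk" ∨ nv.1 = "Speed" then p.1 + nv.2 else p.1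
        let b := if nv.1 = "Defense" ∨ nv.1 = "Sp. Def" ∨ nv.1 = "HP" then p.2 + nv.2 else p.2
        (a, b))
      (x, y)
    = (x + (calculate_x_y_alt stats).1, y + (calculate_x_y_alt stats).2) := by
  induction stats generalizing x y with
  | nil =>
      have h : calculate_x_y_alt [] = (0, 0) := by decide
      simp [h]
  | cons kv rest ih =>
      obtain ⟨k, v⟩ := kv
      simp only [List.map_cons, List.nodup_cons] at hnd
      obtain ⟨hk, hrest⟩ := hnd
      simp only [List.foldl_cons]
      rw [ih hrest]
      have hX : calculate_x_y_alt ((k, v) :: rest)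
          = ((if k ∈ ["Attack", "Sp. Atk", "Speed"] then v else 0) + (calculate_x_y_alt rest).1,
             (if k ∈ ["Defense", "Sp. Def", "HP"] then v else 0) + (calculate_x_y_alt rest).2) := by
        unfold calculate_x_y_alt
        rw [pvSumKeys_cons _ (by decide) k v rest hk, pvSumKeys_cons _ (by decide) k v rest hk]
      rw [hX]
      simp only [List.mem_cons, List.not_mem_nil, or_false]
      split_ifs with h1 h2
      · exfalso
        rcases h1 with rfl | rfl | rfl <;> rcases h2 with h | h | h <;> exact absurd h (by decide)
      all_goals simp only [Prod.mk.injEq]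
      all_goals constructor <;> ring

-- ===== VERDICT (by name: the statement is the Claim_ definition above) =====
theorem calculate_x_y_spec : Claim_equal_calculate_x_y := by
  intro stats _ hpre
  unfold Spec_calculate_x_y calculate_x_y
  rw [calc_foldl stats hpre 0 0]
  simp
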